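-- pv_equiv track=rewrite | github.com/RUB-Informatik-im-Bauwesen/FSE-inspection-tool | backend/utils/model_utils.py | merge_subarrays_match
-- ===== SOURCE A (Python) =====
-- def merge_subarrays_match(current,arr):
--     merged = []
--     while len(arr) > 0:
--         # current = arr.pop(0)
--         merged_with_current = [current]
--         found = False
--         for sublist in merged_with_current:
--             for subarray in arr[:]:
--                 if any(x in subarray for x in sublist):
--                     found = True
--                     merged_with_current.append(subarray)
--                     arr.remove(subarray)
--
--         if found == False:
--             break
--
--         merged_list = [item for sublist in merged_with_current for item in sublist]
--         new_merged_list = []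
--         for elem in merged_list:
--             if elem not in new_merged_list:
--                 new_merged_list.append(elem)
--         merged_list = new_merged_list
--         merged = merged_list
--
--     return merged
-- ===== SOURCE B (Python) =====
-- # B: element -> subarray-index buckets + one BFS over sublists (per-sublist candidates
-- # taken in ascending index order, matching scan order), then a single set-based dedup.
-- # Like A, it removes the merged subarrays from `arr` in place (return value is the claim).
-- def merge_subarrays_match(current, arr):
--     index = {}                     # element -> indices of subarrays containing it (ascending)
--     for i, sub in enumerate(arr):
--         for x in sub:
--             index.setdefault(x, []).append(i)
--     visited = set()
--     order = []                     # discovered subarray indices, in discovery order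
--     queue = [current]
--     qi = 0
--     while qi < len(queue):
--         sub = queue[qi]
--         qi += 1
--         cand = set()
--         for x in sub:
--             for i in index.get(x, ()):
--                 if i not in visited:
--                     cand.add(i)
--         for i in sorted(cand):
--             visited.add(i)
--             order.append(i)
--             queue.append(arr[i])
--     if not order:
--         return []
--     seen = set()
--     out = []
--     for x in current:
--         if x not in seen:
--             seen.add(x)
--             out.append(x)
--     for i in order:
--         for x in arr[i]:
--             if x not in seen:
--                 seen.add(x)
--                 out.append(x)
--     arr[:] = [sub for i, sub in enumerate(arr) if i not in visited]
--     return out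
-- ===== Notes on version B (the rewrite author's own statement) =====
-- stated objective: faster
-- what changed: Replaces A's repeated whole-list rescans, list.remove calls and quadratic 'elem not in list' dedup by a precomputed element->subarray-index multimap, a single BFS over the discovered sublists (per-sublist candidates taken in ascending index order, which is exactly A's scan order), and one set-based dedup pass.
import Mathlib
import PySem

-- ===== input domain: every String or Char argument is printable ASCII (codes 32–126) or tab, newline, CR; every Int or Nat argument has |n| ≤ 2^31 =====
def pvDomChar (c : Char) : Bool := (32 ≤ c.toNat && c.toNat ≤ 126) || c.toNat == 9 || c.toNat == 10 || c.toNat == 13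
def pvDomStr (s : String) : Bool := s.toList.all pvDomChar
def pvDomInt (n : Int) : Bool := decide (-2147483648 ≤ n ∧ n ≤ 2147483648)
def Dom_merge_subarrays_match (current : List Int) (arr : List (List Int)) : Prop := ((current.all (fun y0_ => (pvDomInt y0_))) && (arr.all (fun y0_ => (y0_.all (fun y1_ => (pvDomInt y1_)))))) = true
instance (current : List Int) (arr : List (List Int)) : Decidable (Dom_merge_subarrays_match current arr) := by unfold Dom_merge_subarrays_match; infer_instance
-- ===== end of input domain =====

-- B replaces A's repeated list rescans/removals and quadratic dedup by an element->index
-- multimap + one BFS + a set-based dedup; both Pythons also remove the merged subarrays from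
-- `arr` in place — the equivalence proved here is about the RETURN value.

-- ===== PORT A =====
-- arr.remove(v): removes the first occurrence; in A the removed value is always present
-- (it was just read from a snapshot of arr), so Python's ValueError branch is unreachable
-- and this total helper is exact there.
def pyRemoveFirst (arr : List (List Int)) (v : List Int) : List (List Int) :=
  match arr with
  | [] => []
  | a :: rest => if a = v then rest else a :: pyRemoveFirst rest v

-- the inner 'for subarray in arr[:]' loop of A, for one sublist (snapshot = arr[:])
def scanA (sublist : List Int) (snapshot : List (List Int)) (arr mwc : List (List Int))
    (found : Bool) : List (List Int) × List (List Int) × Bool :=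
  match snapshot with
  | [] => (mwc, arr, found)
  | sub :: rest =>
    if sublist.any (fun x => sub.contains x) then
      scanA sublist rest (pyRemoveFirst arr sub) (mwc ++ [sub]) true
    else
      scanA sublist rest arr mwc found

-- 'for sublist in merged_with_current' over the GROWING list, by index i;
-- fuel only makes the recursion structural, it is provably never exhausted at the call site
def innerA (fuel : Nat) (mwc : List (List Int)) (i : Nat) (arr : List (List Int))
    (found : Bool) : List (List Int) × List (List Int) × Bool :=
  match fuel with
  | 0 => (mwc, arr, found)
  | fuel + 1 =>
    if h : i < mwc.length then
      let r := scanA mwc[i] arr arr mwc found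
      innerA fuel r.1 (i + 1) r.2.1 r.2.2
    else (mwc, arr, found)

-- the outer 'while len(arr) > 0' loop; same remark about fuel
def whileA (fuel : Nat) (current : List Int) (arr : List (List Int)) (merged : List Int) :
    List Int :=
  match fuel with
  | 0 => merged
  | fuel + 1 =>
    if arr.length > 0 then
      let r := innerA (1 + arr.length + 1) [current] 0 arr false
      if r.2.2 then
        let merged_list := r.1.foldl (fun acc sub => acc ++ sub) []
        let new_merged := merged_list.foldl
          (fun acc e => if acc.contains e then acc else acc ++ [e]) []
        whileA fuel current r.2.1 new_merged
      else merged
    else merged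

def merge_subarrays_match (current : List Int) (arr : List (List Int)) : List Int :=
  whileA (arr.length + 1) current arr []

-- ===== PORT B =====
-- index = {}; for i, sub in enumerate(arr): for x in sub: index.setdefault(x, []).append(i)
def buildIndexB (arr : List (List Int)) : PySem.Dict Int (List Nat) :=
  arr.zipIdx.foldl
    (fun d p => p.1.foldl (fun d x => d.insert x (d.getD x [] ++ [p.2])) d)
    PySem.Dict.empty

-- cand = set(); for x in sub: for i in index.get(x, ()): if i not in visited: cand.add(i)
def candB (index : PySem.Dict Int (List Nat)) (visited : List Nat) (sub : List Int) :
    List Nat :=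
  sub.foldl
    (fun c x =>
      (index.getD x []).foldl
        (fun c i => if visited.contains i then c else PySem.Set.add c i) c)
    []

-- the 'while qi < len(queue)' BFS; state = (queue, visited, order); arr[i] is in range here
def bfsB (arr : List (List Int)) (index : PySem.Dict Int (List Nat)) (fuel : Nat)
    (queue : List (List Int)) (qi : Nat) (visited order : List Nat) : List Nat :=
  match fuel with
  | 0 => order
  | fuel + 1 =>
    if h : qi < queue.length then
      let sub := queue[qi]
      let cand := PySem.List.sorted (candB index visited sub) (fun i => i) false
      let st := cand.foldl
        (fun (s : List (List Int) × List Nat × List Nat) i =>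
          (s.1 ++ [arr.getD i []], PySem.Set.add s.2.1 i, s.2.2 ++ [i]))
        (queue, visited, order)
      bfsB arr index fuel st.1 (qi + 1) st.2.1 st.2.2
    else order

-- seen = set(); out = []; for x in …: if x not in seen: seen.add(x); out.append(x)
def dedupStepB (so : List Int × List Int) (x : Int) : List Int × List Int :=
  if so.1.contains x then so else (PySem.Set.add so.1 x, so.2 ++ [x])

def merge_subarrays_match_alt (current : List Int) (arr : List (List Int)) : List Int :=
  let index := buildIndexB arr
  let order := bfsB arr index (arr.length + 1) [current] 0 [] []
  if order = [] then []
  else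
    let s1 := current.foldl dedupStepB ([], [])
    let s2 := order.foldl (fun so i => (arr.getD i []).foldl dedupStepB so) s1
    s2.2

-- ===== PRECONDITION & SPEC =====
def Spec_merge_subarrays_match (current : List Int) (arr : List (List Int)) (out : List Int) : Prop := out = merge_subarrays_match_alt current arr
instance (current : List Int) (arr : List (List Int)) (out : List Int) : Decidable (Spec_merge_subarrays_match current arr out) := by unfold Spec_merge_subarrays_match; infer_instance

-- ===== CLAIM (what is proved, stated in full; the proofs are below) =====
def Claim_equal_merge_subarrays_match : Prop := ∀ (current : List Int) (arr : List (List Int)), Dom_merge_subarrays_match current arr → Spec_merge_subarrays_match current arr (merge_subarrays_match current arr)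

-- ===== LEMMAS AND PROOFS =====

-- reference BFS both ports are reduced to: does sublist s share an element with t?
def pMatch (s t : List Int) : Bool := s.any (fun x => t.contains x)

-- reference BFS: (discovered sublists in discovery order, remaining sublists in order)
def bfsR (queue rem : List (List Int)) : List (List Int) × List (List Int) :=
  match queue with
  | [] => ([], rem)
  | s :: q =>
    let m := rem.filter (pMatch s)
    let r := rem.filter (fun t => !(pMatch s t))
    let d := bfsR (q ++ m) r
    (m ++ d.1, d.2)
termination_by queue.length + rem.length
decreasing_by
  simp only [List.unattach_filter, List.unattach_attach, List.length_append, List.length_cons]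
  have := (List.length_eq_length_filter_add (pMatch s) (l := rem)).symm
  omega

def dedupFold (acc : List Int) (l : List Int) : List Int :=
  l.foldl (fun acc e => if acc.contains e then acc else acc ++ [e]) acc

theorem pyRemoveFirst_keep (keep rest : List (List Int)) (v : List Int)
    (h : ∀ t ∈ keep, t ≠ v) : pyRemoveFirst (keep ++ v :: rest) v = keep ++ rest := by
  induction keep with
  | nil => simp [pyRemoveFirst]
  | cons a k ih =>
    have ha : a ≠ v := h a (by simp)
    simp only [List.cons_append, pyRemoveFirst, if_neg ha]
    rw [ih (fun t ht => h t (by simp [ht]))]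

theorem scanA_spec (s : List Int) (snapshot : List (List Int)) :
    ∀ (keep mwc : List (List Int)) (found : Bool),
      (∀ t ∈ keep, pMatch s t = false) →
      scanA s snapshot (keep ++ snapshot) mwc found =
        (mwc ++ snapshot.filter (pMatch s),
         keep ++ snapshot.filter (fun t => !(pMatch s t)),
         found || snapshot.any (pMatch s)) := by
  induction snapshot with
  | nil => intro keep mwc found _; simp [scanA]
  | cons sub rest ih =>
    intro keep mwc found hk
    have hany : (s.any fun x => sub.contains x) = pMatch s sub := rfl
    by_cases hp : pMatch s sub = true
    · have hne : ∀ t ∈ keep, t ≠ sub := by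
        intro t ht he; have := hk t ht; rw [he, hp] at this; exact Bool.noConfusion this
      show scanA s (sub :: rest) (keep ++ sub :: rest) mwc found = _
      simp only [scanA, hany, hp, if_true]
      rw [pyRemoveFirst_keep keep rest sub hne, ih keep (mwc ++ [sub]) true hk]
      simp only [List.filter_cons, hp, Bool.not_true, if_true, if_false,
        Bool.false_eq_true, List.any_cons, List.append_assoc, List.singleton_append,
        Prod.mk.injEq]
      exact ⟨trivial, trivial, by cases found <;> simp⟩
    · rw [Bool.not_eq_true] at hp
      show scanA s (sub :: rest) (keep ++ sub :: rest) mwc found = _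
      simp only [scanA, hany, hp, Bool.false_eq_true, if_false]
      have : keep ++ sub :: rest = (keep ++ [sub]) ++ rest := by simp
      rw [this, ih (keep ++ [sub]) mwc found
        (by intro t ht; rcases List.mem_append.mp ht with h1 | h1
            · exact hk t h1
            · simp at h1; subst h1; exact hp)]
      simp only [List.filter_cons, hp, Bool.not_false, if_true, if_false,
        Bool.false_eq_true, List.any_cons, List.append_assoc, List.singleton_append,
        Bool.false_or]

theorem innerA_spec (fuel : Nat) :
    ∀ (mwc : List (List Int)) (i : Nat) (arr : List (List Int)) (found : Bool),
      i ≤ mwc.length → mwc.length - i + arr.length < fuel →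
      innerA fuel mwc i arr found =
        (mwc ++ (bfsR (mwc.drop i) arr).1, (bfsR (mwc.drop i) arr).2,
         found || !decide ((bfsR (mwc.drop i) arr).1 = [])) := by
  induction fuel with
  | zero => intro mwc i arr found hi hf; omega
  | succ fuel ih =>
    intro mwc i arr found hi hf
    by_cases h : i < mwc.length
    · have hscan := scanA_spec mwc[i] arr [] mwc found (by intro t ht; cases ht)
      simp only [List.nil_append] at hscan
      show innerA (fuel + 1) mwc i arr found = _
      simp only [innerA, dif_pos h, hscan]
      have hsplit := (List.length_eq_length_filter_add (pMatch mwc[i]) (l := arr)).symm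
      rw [ih (mwc ++ arr.filter (pMatch mwc[i])) (i + 1)
            (arr.filter (fun t => !(pMatch mwc[i] t)))
            (found || arr.any (pMatch mwc[i]))
            (by simp; omega) (by simp only [List.length_append]; omega)]
      have hdrop : (mwc ++ arr.filter (pMatch mwc[i])).drop (i + 1)
          = mwc.drop (i + 1) ++ arr.filter (pMatch mwc[i]) :=
        List.drop_append_of_le_length h
      rw [hdrop, List.drop_eq_getElem_cons h]
      conv_rhs => rw [bfsR]
      simp only [List.append_assoc, Prod.mk.injEq, true_and]
      have hany : arr.any (pMatch mwc[i]) = !decide (List.filter (pMatch mwc[i]) arr = []) := by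
        cases hb : arr.any (pMatch mwc[i]) <;>
          simp_all [List.any_eq_false, List.any_eq_true, List.filter_eq_nil_iff]
      rw [hany]
      simp [List.append_eq_nil_iff, Bool.or_assoc]
    · have hd : mwc.drop i = [] := List.drop_of_length_le (Nat.le_of_not_lt h)
      show innerA (fuel + 1) mwc i arr found = _
      simp [innerA, h, hd, bfsR]

theorem bfsR_rem_subset : ∀ (q rem : List (List Int)), ∀ t ∈ (bfsR q rem).2, t ∈ rem := by
  intro q rem
  induction q, rem using bfsR.induct with
  | case1 rem => simp [bfsR]
  | case2 rem s q m r ih =>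
    simp only [m, r, List.unattach_filter, List.unattach_attach] at ih
    intro t ht
    rw [bfsR] at ht
    exact List.mem_of_mem_filter (ih t ht)

theorem bfsR_no_match : ∀ (q rem : List (List Int)) (s : List Int), s ∈ q →
    ∀ t ∈ (bfsR q rem).2, pMatch s t = false := by
  intro q rem
  induction q, rem using bfsR.induct with
  | case1 rem => intro s hs; cases hs
  | case2 rem s0 q m r ih =>
    simp only [m, r, List.unattach_filter, List.unattach_attach] at ih
    intro s hs t ht
    rw [bfsR] at ht
    rcases List.mem_cons.mp hs with h1 | h1
    · subst h1
      have hr := bfsR_rem_subset (q ++ rem.filter (pMatch s)) (rem.filter (fun t => !(pMatch s t))) t ht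
      simpa using (List.mem_filter.mp hr).2
    · exact ih s (List.mem_append_left _ h1) t ht

theorem whileA_stop (f : Nat) (current : List Int) (R : List (List Int)) (new : List Int)
    (hf : 1 ≤ f) (hR : ∀ t ∈ R, pMatch current t = false) : whileA f current R new = new := by
  obtain ⟨f', rfl⟩ : ∃ f', f = f' + 1 := ⟨f - 1, by omega⟩
  by_cases hlen : R.length > 0
  · have hm : R.filter (pMatch current) = [] :=
      List.filter_eq_nil_iff.mpr (by intro t ht; simp [hR t ht])
    have hb : (bfsR [current] R).1 = [] := by
      rw [show ([current] : List (List Int)) = current :: [] from rfl, bfsR]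
      simp [hm, bfsR]
    show whileA (f' + 1) current R new = new
    simp only [whileA, if_pos hlen]
    rw [innerA_spec _ _ _ _ _ (by simp) (by simp)]
    simp [hb]
  · show whileA (f' + 1) current R new = new
    simp [whileA, hlen]

theorem A_eq_ref (current : List Int) (arr : List (List Int)) :
    merge_subarrays_match current arr =
      if (bfsR [current] arr).1 = [] then []
      else dedupFold [] (current ++ (bfsR [current] arr).1.flatten) := by
  show whileA (arr.length + 1) current arr [] = _
  by_cases ha : arr = []
  · subst ha; simp [whileA, bfsR]
  · have hlen : 0 < arr.length := List.length_pos_of_ne_nil ha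
    simp only [whileA, if_pos hlen]
    rw [innerA_spec _ _ _ _ _ (by simp) (by simp)]
    simp only [List.drop_zero]
    by_cases hD : (bfsR [current] arr).1 = []
    · simp [hD]
    · simp only [hD, Bool.false_or, decide_false, Bool.not_false, if_true, if_false]
      rw [PySem.List.foldl_append_eq_flatten]
      simp only [List.nil_append, List.flatten_append, List.flatten_cons, List.flatten_nil,
        List.append_nil]
      exact whileA_stop _ _ _ _ (by omega)
        (fun t ht => bfsR_no_match [current] arr current (by simp) t ht)

theorem dictAppend_mem (a : List Int) (n : Nat) :
    ∀ (d : PySem.Dict Int (List Nat)) (y : Int) (i : Nat),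
      i ∈ (a.foldl (fun d x => d.insert x (d.getD x [] ++ [n])) d).getD y [] ↔
        i ∈ d.getD y [] ∨ (y ∈ a ∧ i = n) := by
  induction a with
  | nil => simp
  | cons x rest ih =>
    intro d y i
    rw [List.foldl_cons, ih, PySem.Dict.getD_insert]
    by_cases hyx : y = x
    · subst hyx; simp; tauto
    · simp [hyx]

theorem buildIndexB_aux :
    ∀ (l : List (List Int)) (k : Nat) (d : PySem.Dict Int (List Nat)) (y : Int) (i : Nat),
      i ∈ ((l.zipIdx k).foldl
            (fun d p => p.1.foldl (fun d x => d.insert x (d.getD x [] ++ [p.2])) d) d).getD y []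
        ↔ i ∈ d.getD y [] ∨ (∃ j, j < l.length ∧ i = k + j ∧ y ∈ l.getD j []) := by
  intro l
  induction l with
  | nil => simp
  | cons a rest ih =>
    intro k d y i
    rw [List.zipIdx_cons, List.foldl_cons, ih, dictAppend_mem]
    constructor
    · rintro ((h1 | ⟨hy, hi⟩) | ⟨j, hj, hi, hy⟩)
      · exact Or.inl h1
      · exact Or.inr ⟨0, by simp, by omega, by simpa using hy⟩
      · exact Or.inr ⟨j + 1, by simp only [List.length_cons]; omega, by omega, by simpa using hy⟩
    · rintro (h1 | ⟨j, hj, hi, hy⟩)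
      · exact Or.inl (Or.inl h1)
      · match j with
        | 0 => exact Or.inl (Or.inr ⟨by simpa using hy, by omega⟩)
        | j + 1 => exact Or.inr ⟨j, by simp only [List.length_cons] at hj; omega, by omega, by simpa using hy⟩

theorem mem_buildIndexB (arr : List (List Int)) (x : Int) (i : Nat) :
    i ∈ (buildIndexB arr).getD x [] ↔ i < arr.length ∧ x ∈ arr.getD i [] := by
  have h := buildIndexB_aux arr 0 PySem.Dict.empty x i
  rw [show arr.zipIdx = arr.zipIdx 0 from rfl] at h
  rw [buildIndexB, h]
  simp only [PySem.Dict.getD_empty, List.not_mem_nil, false_or]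
  constructor
  · rintro ⟨j, hj, hi, hy⟩; exact ⟨by omega, by rwa [show i = j by omega]⟩
  · rintro ⟨hi, hy⟩; exact ⟨i, hi, by omega, hy⟩

theorem candInner_mem (visited : List Nat) (bucket : List Nat) (j : Nat) :
    ∀ (c : List Nat),
      j ∈ bucket.foldl (fun c i => if visited.contains i then c else PySem.Set.add c i) c ↔
        j ∈ c ∨ (j ∈ bucket ∧ j ∉ visited) := by
  induction bucket with
  | nil => simp
  | cons i rest ih =>
    intro c
    rw [List.foldl_cons, ih]
    by_cases hv : visited.contains i
    · have hv' : i ∈ visited := by simpa using hv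
      simp only [hv, if_true]
      constructor
      · rintro (h | h)
        · exact Or.inl h
        · exact Or.inr ⟨List.mem_cons_of_mem _ h.1, h.2⟩
      · rintro (h | ⟨h1, h2⟩)
        · exact Or.inl h
        · rcases List.mem_cons.mp h1 with h1 | h1
          · exact absurd (h1 ▸ hv') h2
          · exact Or.inr ⟨h1, h2⟩
    · have hv' : i ∉ visited := by simpa using hv
      simp only [hv, if_false, Bool.false_eq_true, PySem.Set.mem_add]
      constructor
      · rintro ((h | h) | h)
        · exact Or.inl h
        · exact Or.inr ⟨by simp [h], by rwa [h]⟩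
        · exact Or.inr ⟨List.mem_cons_of_mem _ h.1, h.2⟩
      · rintro (h | ⟨h1, h2⟩)
        · exact Or.inl (Or.inl h)
        · rcases List.mem_cons.mp h1 with h1 | h1
          · exact Or.inl (Or.inr h1)
          · exact Or.inr ⟨h1, h2⟩

theorem candInner_nodup (visited : List Nat) (bucket : List Nat) :
    ∀ (c : List Nat), c.Nodup →
      (bucket.foldl (fun c i => if visited.contains i then c else PySem.Set.add c i) c).Nodup := by
  induction bucket with
  | nil => intro c hc; simpa using hc
  | cons i rest ih =>
    intro c hc
    rw [List.foldl_cons]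
    by_cases hv : visited.contains i
    · simp only [hv, if_true]
      exact ih c hc
    · simp only [hv, Bool.false_eq_true, if_false]
      exact ih _ (PySem.Set.nodup_add c i hc)

theorem candB_mem (index : PySem.Dict Int (List Nat)) (visited : List Nat) (sub : List Int)
    (j : Nat) : j ∈ candB index visited sub ↔
      (∃ x ∈ sub, j ∈ index.getD x []) ∧ j ∉ visited := by
  suffices h : ∀ (l : List Int) (c : List Nat),
      j ∈ l.foldl (fun c x =>
          (index.getD x []).foldl
            (fun c i => if visited.contains i then c else PySem.Set.add c i) c) c ↔
        j ∈ c ∨ ((∃ x ∈ l, j ∈ index.getD x []) ∧ j ∉ visited) by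
    rw [candB, h sub []]
    simp
  intro l
  induction l with
  | nil => simp
  | cons x rest ih =>
    intro c
    rw [List.foldl_cons, ih, candInner_mem]
    constructor
    · rintro ((h | h) | ⟨⟨y, hy1, hy2⟩, h2⟩)
      · exact Or.inl h
      · exact Or.inr ⟨⟨x, by simp, h.1⟩, h.2⟩
      · exact Or.inr ⟨⟨y, by simp [hy1], hy2⟩, h2⟩
    · rintro (h | ⟨⟨y, hy1, hy2⟩, h2⟩)
      · exact Or.inl (Or.inl h)
      · rcases List.mem_cons.mp hy1 with h1 | h1
        · exact Or.inl (Or.inr ⟨h1 ▸ hy2, h2⟩)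
        · exact Or.inr ⟨⟨y, h1, hy2⟩, h2⟩

theorem candB_nodup (index : PySem.Dict Int (List Nat)) (visited : List Nat)
    (sub : List Int) : (candB index visited sub).Nodup := by
  suffices h : ∀ (l : List Int) (c : List Nat), c.Nodup →
      (l.foldl (fun c x =>
          (index.getD x []).foldl
            (fun c i => if visited.contains i then c else PySem.Set.add c i) c) c).Nodup by
    exact h sub [] List.nodup_nil
  intro l
  induction l with
  | nil => intro c hc; simpa using hc
  | cons x rest ih =>
    intro c hc
    rw [List.foldl_cons]
    exact ih _ (candInner_nodup visited _ c hc)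

theorem pMatch_iff (s t : List Int) : pMatch s t = true ↔ ∃ x ∈ s, x ∈ t := by
  simp [pMatch]

theorem sortedCand_eq (arr : List (List Int)) (visited : List Nat) (sub : List Int) :
    PySem.List.sorted (candB (buildIndexB arr) visited sub) (fun i => i) false =
      (List.range arr.length).filter
        (fun j => !(visited.contains j) && pMatch sub (arr.getD j [])) := by
  apply PySem.List.sorted_eq_of_perm_of_pairwise_lt
  · apply (List.perm_ext_iff_of_nodup (List.Nodup.filter _ (List.nodup_range)) (candB_nodup _ _ _)).mpr
    intro j
    rw [candB_mem, List.mem_filter, List.mem_range]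
    constructor
    · rintro ⟨hj, hcond⟩
      simp only [Bool.and_eq_true, Bool.not_eq_true'] at hcond
      obtain ⟨x, hx1, hx2⟩ := (pMatch_iff sub _).mp hcond.2
      exact ⟨⟨x, hx1, (mem_buildIndexB arr x j).mpr ⟨hj, hx2⟩⟩, by simpa using hcond.1⟩
    · rintro ⟨⟨x, hx1, hx2⟩, h2⟩
      have hb := (mem_buildIndexB arr x j).mp hx2
      refine ⟨hb.1, ?_⟩
      simp only [Bool.and_eq_true, Bool.not_eq_true']
      exact ⟨by simpa using h2, (pMatch_iff sub _).mpr ⟨x, hx1, hb.2⟩⟩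
  · exact List.Pairwise.filter _ (List.pairwise_lt_range)

theorem trioFold (arr : List (List Int)) (cand : List Nat) :
    ∀ (queue : List (List Int)) (visited order : List Nat),
      (∀ i ∈ cand, i ∉ visited) → cand.Nodup →
      cand.foldl (fun s i => (s.1 ++ [arr.getD i []], PySem.Set.add s.2.1 i, s.2.2 ++ [i]))
          (queue, visited, order)
        = (queue ++ cand.map (fun i => arr.getD i []), visited ++ cand, order ++ cand) := by
  induction cand with
  | nil => intro queue visited order _ _; simp
  | cons i rest ih =>
    intro queue visited order hfresh hnd
    rw [List.foldl_cons]
    have hadd : PySem.Set.add visited i = visited ++ [i] :=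
      PySem.Set.add_of_not_mem (hfresh i (by simp))
    simp only [hadd]
    rw [ih (queue ++ [arr.getD i []]) (visited ++ [i]) (order ++ [i])
      (by intro j hj
          have hji : j ≠ i := by
            intro he; exact (List.nodup_cons.mp hnd).1 (he ▸ hj)
          simp [hfresh j (List.mem_cons_of_mem _ hj), hji])
      (List.nodup_cons.mp hnd).2]
    simp

theorem nodupBound (l : List Nat) (n : Nat) (h1 : l.Nodup) (h : ∀ i ∈ l, i < n) :
    l.length ≤ n := by
  have h2 : l ⊆ List.range n := fun i hi => List.mem_range.mpr (h i hi)
  simpa using (List.subperm_of_subset h1 h2).length_le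

theorem bfsB_spec (arr : List (List Int)) :
    ∀ (fuel : Nat) (queue : List (List Int)) (qi : Nat) (visited order : List Nat),
      visited.Nodup → (∀ i ∈ visited, i < arr.length) → qi ≤ queue.length →
      (queue.length - qi) + (arr.length - visited.length) ≤ fuel →
      ∃ Δ : List Nat,
        bfsB arr (buildIndexB arr) fuel queue qi visited order = order ++ Δ ∧
        Δ.map (fun j => arr.getD j []) =
          (bfsR (queue.drop qi)
            (((List.range arr.length).filter (fun j => !(visited.contains j))).map
              (fun j => arr.getD j []))).1 := by
  intro fuel
  induction fuel with
  | zero =>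
    intro queue qi visited order hnd hb hq hf
    refine ⟨[], by simp [bfsB], ?_⟩
    rw [List.drop_of_length_le (by omega)]
    simp [bfsR]
  | succ fuel ih =>
    intro queue qi visited order hnd hb hq hf
    by_cases h : qi < queue.length
    · have hsort := sortedCand_eq arr visited queue[qi]
      set scand := (List.range arr.length).filter
        (fun j => !(visited.contains j) && pMatch queue[qi] (arr.getD j [])) with hscand
      have hscnd : scand.Nodup := List.Nodup.filter _ List.nodup_range
      have hfresh : ∀ i ∈ scand, i ∉ visited := by
        intro i hi
        have := (List.mem_filter.mp hi).2
        simp only [Bool.and_eq_true, Bool.not_eq_true'] at this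
        simpa using this.1
      have hlt : ∀ i ∈ scand, i < arr.length := by
        intro i hi; exact List.mem_range.mp (List.mem_filter.mp hi).1
      have hnd' : (visited ++ scand).Nodup :=
        List.Nodup.append hnd hscnd (by
          intro a ha hb'; exact hfresh a hb' ha)
      have hlen' : (visited ++ scand).length ≤ arr.length :=
        nodupBound _ _ hnd' (by
          intro i hi
          rcases List.mem_append.mp hi with h1 | h1
          · exact hb i h1
          · exact hlt i h1)
      obtain ⟨Δ', h1, h2⟩ := ih (queue ++ scand.map (fun j => arr.getD j [])) (qi + 1)
        (visited ++ scand) (order ++ scand) hnd'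
        (by intro i hi
            rcases List.mem_append.mp hi with h1 | h1
            · exact hb i h1
            · exact hlt i h1)
        (by simp only [List.length_append]; omega)
        (by simp only [List.length_append, List.length_map] at *; omega)
      refine ⟨scand ++ Δ', ?_, ?_⟩
      · show bfsB arr (buildIndexB arr) (fuel + 1) queue qi visited order = _
        simp only [bfsB, dif_pos h, hsort]
        rw [trioFold arr scand _ _ _ hfresh hscnd, h1]
        simp
      · rw [List.map_append, h2]
        rw [List.drop_append_of_le_length (by omega), List.drop_eq_getElem_cons h]
        conv_rhs => rw [bfsR]
        have hmapfil : ∀ (p : List Int → Bool) (l : List Nat),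
            (l.map (fun j => arr.getD j [])).filter p
              = (l.filter (fun j => p (arr.getD j []))).map (fun j => arr.getD j []) := by
          intro p l; simp [List.filter_map]; rfl
        have hm : (((List.range arr.length).filter (fun j => !(visited.contains j))).map
              (fun j => arr.getD j [])).filter (pMatch queue[qi]) =
            scand.map (fun j => arr.getD j []) := by
          rw [hmapfil, List.filter_filter, hscand]
          congr 1
          exact List.filter_congr (by intro j _; rw [Bool.and_comm])
        have hr : (((List.range arr.length).filter (fun j => !(visited.contains j))).map
              (fun j => arr.getD j [])).filter (fun t => !(pMatch queue[qi] t)) =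
            ((List.range arr.length).filter (fun j => !((visited ++ scand).contains j))).map
              (fun j => arr.getD j []) := by
          rw [hmapfil, List.filter_filter]
          congr 1
          apply List.filter_congr
          intro j hj
          have hmem : scand.contains j
              = (!visited.contains j && pMatch queue[qi] (arr.getD j [])) := by
            by_cases hin : j ∈ scand
            · have hc2 := (List.mem_filter.mp hin).2
              rw [hc2]
              simpa using hin
            · cases hb2 : (!visited.contains j && pMatch queue[qi] (arr.getD j [])) with
              | true => exact absurd (List.mem_filter.mpr ⟨hj, hb2⟩) hin
              | false => simpa using hin
          rw [List.contains_append, hmem]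
          cases hv : visited.contains j <;>
            cases hp : pMatch queue[qi] (arr.getD j []) <;> simp
        rw [hm, hr]
    · refine ⟨[], ?_, ?_⟩
      · show bfsB arr (buildIndexB arr) (fuel + 1) queue qi visited order = _
        simp [bfsB, h]
      · rw [List.drop_of_length_le (by omega)]
        simp [bfsR]

theorem dedupPair (l : List Int) : ∀ s : List Int,
    l.foldl dedupStepB (s, s) = (dedupFold s l, dedupFold s l) := by
  induction l with
  | nil => intro s; simp [dedupFold]
  | cons x rest ih =>
    intro s
    rw [List.foldl_cons]
    show rest.foldl dedupStepB (dedupStepB (s, s) x) = _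
    by_cases hc : s.contains x
    · have hx : x ∈ s := by simpa using hc
      have hstep : dedupStepB (s, s) x = (s, s) := by simp [dedupStepB, hx]
      rw [hstep, ih s]
      simp [dedupFold, List.foldl_cons, hx]
    · have hx : x ∉ s := by simpa using hc
      have hstep : dedupStepB (s, s) x = (s ++ [x], s ++ [x]) := by
        simp [dedupStepB, hx]
      rw [hstep, ih (s ++ [x])]
      simp [dedupFold, List.foldl_cons, hx]

theorem mapRangeGetD (arr : List (List Int)) :
    (List.range arr.length).map (fun j => arr.getD j []) = arr := by
  apply List.ext_getElem
  · simp
  · intro i h1 h2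
    simp [List.getD_eq_getElem?_getD, List.getElem?_eq_getElem h2]

theorem B_eq_ref (current : List Int) (arr : List (List Int)) :
    merge_subarrays_match_alt current arr =
      if (bfsR [current] arr).1 = [] then []
      else dedupFold [] (current ++ (bfsR [current] arr).1.flatten) := by
  obtain ⟨Δ, h1, h2⟩ := bfsB_spec arr (arr.length + 1) [current] 0 [] []
    List.nodup_nil (by simp) (by simp) (by simp [List.length_cons]; omega)
  simp only [List.nil_append] at h1
  rw [List.drop_zero] at h2
  have hrem : ((List.range arr.length).filter (fun j => !(([] : List Nat).contains j))).map
      (fun j => arr.getD j []) = arr := by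
    rw [show ((List.range arr.length).filter (fun j => !(([] : List Nat).contains j)))
        = (List.range arr.length).filter (fun _ => true) from
      List.filter_congr (by intro j _; simp)]
    rw [List.filter_true]
    exact mapRangeGetD arr
  rw [hrem] at h2
  show (let index := buildIndexB arr
        let order := bfsB arr index (arr.length + 1) [current] 0 [] []
        if order = [] then []
        else
          let s1 := current.foldl dedupStepB ([], [])
          let s2 := order.foldl (fun so i => (arr.getD i []).foldl dedupStepB so) s1
          s2.2) = _
  simp only [h1]
  by_cases hΔ : Δ = []
  · subst hΔ
    simp [← h2]
  · have hD : (bfsR [current] arr).1 ≠ [] := by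
      rw [← h2]; simpa using hΔ
    simp only [hΔ, hD]
    have hfold : Δ.foldl (fun so i => (arr.getD i []).foldl dedupStepB so)
          (current.foldl dedupStepB ([], []))
        = (current ++ (Δ.map (fun j => arr.getD j [])).flatten).foldl dedupStepB ([], []) := by
      rw [List.foldl_append, List.foldl_flatten, List.foldl_map]
    rw [hfold, h2, dedupPair]
  

-- ===== VERDICT (by name: the statement is the Claim_ definition above) =====
theorem merge_subarrays_match_spec : Claim_equal_merge_subarrays_match := by
  intro current arr _
  show _ = _
  rw [A_eq_ref, B_eq_ref]
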